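-- pv_equiv track=rewrite | github.com/Unobtainiumrock/gulubala | contracts/prompts.py | _extract_first_balanced_object
-- ===== SOURCE A (Python) =====
-- def _extract_first_balanced_object(raw: str) -> str | None:
--     """Return the first ``{...}`` span with balanced braces, respecting string escapes."""
--     start = raw.find("{")
--     if start == -1:
--         return None
--     depth = 0
--     in_string = False
--     escape = False
--     i = start
--     while i < len(raw):
--         c = raw[i]
--         if in_string:
--             if escape:
--                 escape = False
--             elif c == "\\":
--                 escape = True
--             elif c == '"':
--                 in_string = False
--             i += 1
--             continue
--         if c == '"':
--             in_string = True
--             i += 1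
--             continue
--         if c == "{":
--             depth += 1
--         elif c == "}":
--             depth -= 1
--             if depth == 0:
--                 return raw[start : i + 1]
--         i += 1
--     return None
-- ===== SOURCE B (Python) =====
-- def _extract_first_balanced_object(raw: str) -> str | None:
--     """Return the first ``{...}`` span with balanced braces, respecting string escapes."""
--     start = raw.find("{")
--     if start == -1:
--         return None
--     # Pass 1 (tokenize): positions of braces lying outside string literals.
--     braces = []
--     in_string = False
--     escape = False
--     for i in range(start, len(raw)):
--         c = raw[i]
--         if in_string:
--             if escape:
--                 escape = False
--             elif c == "\\":
--                 escape = True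
--             elif c == '"':
--                 in_string = False
--         elif c == '"':
--             in_string = True
--         elif c in "{}":
--             braces.append((i, c))
--     # Pass 2 (match): scan the token list for the closer of the first opener.
--     depth = 0
--     for i, c in braces:
--         depth += 1 if c == "{" else -1
--         if depth == 0 and c == "}":
--             return raw[start : i + 1]
--     return None
-- ===== Notes on version B (the rewrite author's own statement) =====
-- stated objective: alternative
-- what changed: Replaces A's single interleaved scan (depth counting fused with string-escape handling and an early return) by two staged passes: a tokenizer that first collects the positions of all braces outside string literals, then a separate depth-matching scan over that token list.
import Mathlib
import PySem

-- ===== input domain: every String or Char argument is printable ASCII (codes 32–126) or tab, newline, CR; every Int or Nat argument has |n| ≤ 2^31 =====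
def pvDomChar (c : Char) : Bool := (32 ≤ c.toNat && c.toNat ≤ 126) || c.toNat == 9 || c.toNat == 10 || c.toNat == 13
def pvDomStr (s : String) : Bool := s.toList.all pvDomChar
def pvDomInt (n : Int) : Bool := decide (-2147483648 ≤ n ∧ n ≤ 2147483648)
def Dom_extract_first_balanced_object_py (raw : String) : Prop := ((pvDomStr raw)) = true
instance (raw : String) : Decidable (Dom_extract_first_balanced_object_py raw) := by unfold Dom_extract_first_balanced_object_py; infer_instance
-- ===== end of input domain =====

-- B replaces A's single interleaved scan by two staged passes (tokenize braces outside
-- strings, then depth-match over the token list); objective: alternative (no speed claim).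

-- ===== PORT A =====
-- A's while loop as structural recursion on the suffix from `start`; `i` is the index
-- relative to `start`, and `raw[start:i+1]` is `orig.take (i+1)` of the suffix `orig`.
def pvALoop (orig : List Char) : List Char → Int → Bool → Bool → Nat → Option (List Char)
  | [], _, _, _, _ => none
  | c :: rest, depth, instr, esc, i =>
    if instr then
      if esc then pvALoop orig rest depth true false (i + 1)
      else if c = '\\' then pvALoop orig rest depth true true (i + 1)
      else if c = '"' then pvALoop orig rest depth false false (i + 1)
      else pvALoop orig rest depth true false (i + 1)
    else if c = '"' then pvALoop orig rest depth true false (i + 1)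
    else if c = '{' then pvALoop orig rest (depth + 1) false false (i + 1)
    else if c = '}' then
      if depth - 1 = 0 then some (orig.take (i + 1))
      else pvALoop orig rest (depth - 1) false false (i + 1)
    else pvALoop orig rest depth false false (i + 1)

def extract_first_balanced_object_py (raw : String) : Option String :=
  let start := PySem.Str.find raw "{"
  if start = -1 then none
  else
    let l := raw.toList.drop start.toNat
    pvALoop l l 0 false false 0 |>.map String.ofList

-- ===== PORT B =====
-- Pass 1: collect (index, brace) tokens outside string literals (same string state machine,
-- but producing a token list instead of matching).
def pvTokens : List Char → Nat → Bool → Bool → List (Nat × Char)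
  | [], _, _, _ => []
  | c :: rest, i, instr, esc =>
    if instr then
      if esc then pvTokens rest (i + 1) true false
      else if c = '\\' then pvTokens rest (i + 1) true true
      else if c = '"' then pvTokens rest (i + 1) false false
      else pvTokens rest (i + 1) true false
    else if c = '"' then pvTokens rest (i + 1) true false
    else if c = '{' ∨ c = '}' then (i, c) :: pvTokens rest (i + 1) false false
    else pvTokens rest (i + 1) false false

-- Pass 2: depth-match over the token list; returns the index of the matching '}'.
def pvMatch : List (Nat × Char) → Int → Option Nat
  | [], _ => none
  | (i, c) :: rest, depth =>
    let d := if c = '{' then depth + 1 else depth - 1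
    if d = 0 ∧ c = '}' then some i else pvMatch rest d

def extract_first_balanced_object_py_alt (raw : String) : Option String :=
  let start := PySem.Str.find raw "{"
  if start = -1 then none
  else
    let l := raw.toList.drop start.toNat
    (pvMatch (pvTokens l 0 false false) 0).map (fun j => String.ofList (l.take (j + 1)))

-- ===== PRECONDITION & SPEC =====
def Spec_extract_first_balanced_object_py (raw : String) (out : Option String) : Prop := out = extract_first_balanced_object_py_alt raw
instance (raw : String) (out : Option String) : Decidable (Spec_extract_first_balanced_object_py raw out) := by unfold Spec_extract_first_balanced_object_py; infer_instance

-- ===== CLAIM (what is proved, stated in full; the proofs are below) =====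
def Claim_equal_extract_first_balanced_object_py : Prop := ∀ (raw : String), Dom_extract_first_balanced_object_py raw → Spec_extract_first_balanced_object_py raw (extract_first_balanced_object_py raw)

-- ===== LEMMAS AND PROOFS =====

-- A's fused scan equals B's tokenize-then-match pipeline, for every state.
theorem pvLoop_eq (orig : List Char) :
    ∀ (l : List Char) (i : Nat) (instr esc : Bool) (depth : Int),
    pvALoop orig l depth instr esc i
      = (pvMatch (pvTokens l i instr esc) depth).map (fun j => orig.take (j + 1)) := by
  intro l i instr esc depth
  induction l generalizing i instr esc depth with
  | nil => simp [pvALoop, pvTokens, pvMatch]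
  | cons c rest ih =>
    by_cases hi : instr = true
    · subst hi
      by_cases he : esc = true
      · subst he; simp [pvALoop, pvTokens, ih]
      · simp at he; subst he
        by_cases h1 : c = '\\'
        · simp [pvALoop, pvTokens, h1, ih]
        · by_cases h2 : c = '"' <;> simp [pvALoop, pvTokens, h1, h2, ih]
    · simp at hi; subst hi
      by_cases h2 : c = '"'
      · simp [pvALoop, pvTokens, h2, ih]
      · by_cases h3 : c = '{'
        · simp [pvALoop, pvTokens, pvMatch, h3, ih]
        · by_cases h4 : c = '}'
          · by_cases hz : depth - 1 = 0 <;>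
              simp [pvALoop, pvTokens, pvMatch, h4, hz, ih]
          · simp [pvALoop, pvTokens, h2, h3, h4, ih]

-- ===== VERDICT (by name: the statement is the Claim_ definition above) =====
theorem extract_first_balanced_object_py_spec : Claim_equal_extract_first_balanced_object_py := by
  intro raw _
  unfold Spec_extract_first_balanced_object_py extract_first_balanced_object_py extract_first_balanced_object_py_alt
  simp only []
  split
  · rfl
  · rw [pvLoop_eq, Option.map_map]; rfl
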